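-- pv_equiv track=rewrite | github.com/jianlingl/adapter-parsers | model/eval.py | statistic_compute
-- ===== SOURCE A (Python) =====
-- from typing import List, Optional, Tuple, Dict, Any
--
-- def statistic_compute(gold_triples_list, pred_triples_list, len_set: Optional[Tuple] = None, label: Optional[str] = None):
--     unlabel_span_correct, label_span_correct, gold_span_total, pred_span_total = 0, 0, 0, 0
--
--     for g_triples, p_triples in zip(gold_triples_list, pred_triples_list):
--         gold_dict, unlabel_Gspan_count_dict = get_set_dict_4snt(g_triples, len_set, label)
--         pred_dict, unlabel_Pspan_count_dict = get_set_dict_4snt(p_triples, len_set, label)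
--
--         gold_span_total += len(g_triples)
--         pred_span_total += len(p_triples)
--
--         for k, v in gold_dict.items():
--             for _ in range(v):
--                 if k in pred_dict and pred_dict[k] > 0:
--                     pred_dict[k] -= 1
--                     label_span_correct += 1
--
--                 if not label:
--                     if k[:-1] in unlabel_Pspan_count_dict and unlabel_Pspan_count_dict[k[:-1]] > 0:
--                         unlabel_Pspan_count_dict[k[:-1]] -= 1
--                         unlabel_span_correct += 1
--
--     return unlabel_span_correct, label_span_correct, gold_span_total, pred_span_total
--
-- def get_set_dict_4snt(span_triples, len_set: Optional[Tuple] = None, label: Optional[str] = None) -> List[Dict[Any, int]]: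
--     # 针对特定标签计算LPS的时候，只返回该标签对应的短语集合 span_set
--     # 针对特定长度或者直接计算LPS，UPS的时候，返回有标签的短语集合 span_set 和无标签计数字典 unlabel_span_count
--     span_dict, unlabel_span_count = dict(), dict()
--     for s, e, l in span_triples:
--         if len_set:
--             if len_set[0] <= (e - s) <= len_set[1]:
--                 span_dict[(s, e, l)] = span_dict.get((s, e, l), 0) + 1
--                 unlabel_span_count[(s, e)] = unlabel_span_count.get((s, e), 0) + 1
--         if label:
--             if l == label:
--                 span_dict[(s, e, l)] = span_dict.get((s, e, l), 0) + 1
--         if not len_set and not label: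
--             span_dict[(s, e, l)] = span_dict.get((s, e, l), 0) + 1
--             unlabel_span_count[(s, e)] = unlabel_span_count.get((s, e), 0) + 1
--
--     return span_dict, unlabel_span_count
-- ===== SOURCE B (Python) =====
-- def get_set_dict_4snt(span_triples, len_set=None, label=None):
--     span_dict, unlabel_span_count = dict(), dict()
--     for s, e, l in span_triples:
--         if len_set:
--             if len_set[0] <= (e - s) <= len_set[1]:
--                 span_dict[(s, e, l)] = span_dict.get((s, e, l), 0) + 1
--                 unlabel_span_count[(s, e)] = unlabel_span_count.get((s, e), 0) + 1
--         if label: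
--             if l == label:
--                 span_dict[(s, e, l)] = span_dict.get((s, e, l), 0) + 1
--         if not len_set and not label:
--             span_dict[(s, e, l)] = span_dict.get((s, e, l), 0) + 1
--             unlabel_span_count[(s, e)] = unlabel_span_count.get((s, e), 0) + 1
--     return span_dict, unlabel_span_count
--
--
-- def statistic_compute(gold_triples_list, pred_triples_list, len_set=None, label=None):
--     unlabel_span_correct, label_span_correct, gold_span_total, pred_span_total = 0, 0, 0, 0
--     for g_triples, p_triples in zip(gold_triples_list, pred_triples_list):
--         gold_dict, unlabel_Gspan_count = get_set_dict_4snt(g_triples, len_set, label)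
--         pred_dict, unlabel_Pspan_count = get_set_dict_4snt(p_triples, len_set, label)
--         gold_span_total += len(g_triples)
--         pred_span_total += len(p_triples)
--         label_span_correct += sum(min(v, pred_dict.get(k, 0)) for k, v in gold_dict.items())
--         if not label:
--             unlabel_span_correct += sum(min(v, unlabel_Pspan_count.get(k, 0))
--                                         for k, v in unlabel_Gspan_count.items())
--     return unlabel_span_correct, label_span_correct, gold_span_total, pred_span_total
-- ===== Notes on version B (the rewrite author's own statement) =====
-- stated objective: simpler
-- what changed: The per-occurrence consuming loop that repeatedly decrements entries of pred_dict and the unlabeled pred counter is replaced by a direct sum of min(gold count, pred count) over the gold (un)labeled count dicts, with no dict mutation.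
import Mathlib
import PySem

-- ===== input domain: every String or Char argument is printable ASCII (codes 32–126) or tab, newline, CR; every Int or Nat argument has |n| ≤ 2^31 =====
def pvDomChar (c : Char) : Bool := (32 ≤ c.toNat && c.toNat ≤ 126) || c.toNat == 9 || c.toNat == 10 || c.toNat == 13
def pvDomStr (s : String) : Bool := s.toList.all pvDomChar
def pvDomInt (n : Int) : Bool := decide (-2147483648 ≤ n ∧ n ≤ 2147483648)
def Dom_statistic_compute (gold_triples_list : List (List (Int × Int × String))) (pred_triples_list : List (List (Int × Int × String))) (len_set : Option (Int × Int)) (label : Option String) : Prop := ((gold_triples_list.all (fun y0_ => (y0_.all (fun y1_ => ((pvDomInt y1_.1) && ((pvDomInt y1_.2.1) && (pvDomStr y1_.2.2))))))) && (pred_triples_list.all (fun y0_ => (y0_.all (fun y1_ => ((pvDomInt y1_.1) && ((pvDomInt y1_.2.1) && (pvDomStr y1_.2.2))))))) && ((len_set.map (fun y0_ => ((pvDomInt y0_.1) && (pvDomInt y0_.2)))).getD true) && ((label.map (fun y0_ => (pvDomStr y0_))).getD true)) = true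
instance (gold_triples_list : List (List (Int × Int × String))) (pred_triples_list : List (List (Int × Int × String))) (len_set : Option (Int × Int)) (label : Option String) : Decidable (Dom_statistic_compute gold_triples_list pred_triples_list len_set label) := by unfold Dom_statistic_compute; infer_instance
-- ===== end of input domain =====

-- B replaces A's per-occurrence consuming loop (saturating decrements on the pred dicts) by
-- direct sums of min(gold count, pred count); same values, no dict mutation (objective: simpler).
-- ===== PORT A =====
-- B changes only statistic_compute (the counting loop); get_set_dict_4snt is identical in A and B,
-- so both ports share this one transliteration of it.
-- Python truthiness of the optional `label`: falsy iff None or "".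
def pyTruthyLabel (label : Option String) : Bool :=
  match label with
  | none => false
  | some s => !(s == "")

def pvGsdStep (len_set : Option (Int × Int)) (label : Option String)
    (st : PySem.Dict (Int × Int × String) Int × PySem.Dict (Int × Int) Int)
    (t : Int × Int × String) :
    PySem.Dict (Int × Int × String) Int × PySem.Dict (Int × Int) Int :=
  let s := t.1; let e := t.2.1; let l := t.2.2
  -- if len_set: if len_set[0] <= (e - s) <= len_set[1]: increment both dicts
  let st :=
    match len_set with
    | some ls =>
        if ls.1 ≤ e - s ∧ e - s ≤ ls.2 then
          (st.1.insert (s, e, l) (st.1.getD (s, e, l) 0 + 1),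
           st.2.insert (s, e) (st.2.getD (s, e) 0 + 1))
        else st
    | none => st
  -- if label: if l == label: increment span_dict
  let st :=
    match label with
    | some lab => if lab ≠ "" ∧ l == lab then
          (st.1.insert (s, e, l) (st.1.getD (s, e, l) 0 + 1), st.2)
        else st
    | none => st
  -- if not len_set and not label: increment both dicts
  if len_set = none ∧ pyTruthyLabel label = false then
    (st.1.insert (s, e, l) (st.1.getD (s, e, l) 0 + 1),
     st.2.insert (s, e) (st.2.getD (s, e) 0 + 1))
  else st

def get_set_dict_4snt (span_triples : List (Int × Int × String)) (len_set : Option (Int × Int))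
    (label : Option String) :
    PySem.Dict (Int × Int × String) Int × PySem.Dict (Int × Int) Int :=
  span_triples.foldl (pvGsdStep len_set label) (PySem.Dict.empty, PySem.Dict.empty)

-- the body of A's `for _ in range(v)` loop (state: pred_dict, unlabel_Pspan_count_dict, label_span_correct, unlabel_span_correct)
def pvInnerStep (label : Option String) (k : Int × Int × String)
    (ist : PySem.Dict (Int × Int × String) Int × PySem.Dict (Int × Int) Int × Int × Int) :
    PySem.Dict (Int × Int × String) Int × PySem.Dict (Int × Int) Int × Int × Int :=
  let pd := ist.1; let pu := ist.2.1; let lc := ist.2.2.1; let uc := ist.2.2.2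
  -- if k in pred_dict and pred_dict[k] > 0: pred_dict[k] -= 1; label_span_correct += 1
  let pdlc := if pd.contains k ∧ pd.getD k 0 > 0
    then (pd.insert k (pd.getD k 0 - 1), lc + 1) else (pd, lc)
  -- if not label: if k[:-1] in unlabel_Pspan_count_dict and … > 0: decrement; unlabel_span_correct += 1
  let puuc := if pyTruthyLabel label = false then
      (if pu.contains (k.1, k.2.1) ∧ pu.getD (k.1, k.2.1) 0 > 0
       then (pu.insert (k.1, k.2.1) (pu.getD (k.1, k.2.1) 0 - 1), uc + 1) else (pu, uc))
    else (pu, uc)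
  (pdlc.1, puuc.1, pdlc.2, puuc.2)

-- A's `for k, v in gold_dict.items(): for _ in range(v): …` double loop
def pvSntLoop (label : Option String) (items : List ((Int × Int × String) × Int))
    (ist : PySem.Dict (Int × Int × String) Int × PySem.Dict (Int × Int) Int × Int × Int) :
    PySem.Dict (Int × Int × String) Int × PySem.Dict (Int × Int) Int × Int × Int :=
  items.foldl (fun ist kv =>
    (PySem.List.pyRange 0 kv.2 1).foldl (fun ist _ => pvInnerStep label kv.1 ist) ist) ist

def statistic_compute (gold_triples_list : List (List (Int × Int × String))) (pred_triples_list : List (List (Int × Int × String))) (len_set : Option (Int × Int)) (label : Option String) : Int × Int × Int × Int :=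
  (gold_triples_list.zip pred_triples_list).foldl (fun st gp =>
    let gdgu := get_set_dict_4snt gp.1 len_set label
    let pdpu := get_set_dict_4snt gp.2 len_set label
    let g := st.2.2.1 + PySem.List.len gp.1
    let p := st.2.2.2 + PySem.List.len gp.2
    let r := pvSntLoop label gdgu.1.items (pdpu.1, pdpu.2, st.2.1, st.1)
    (r.2.2.2, r.2.2.1, g, p))
    (0, 0, 0, 0)

-- ===== PORT B =====
def statistic_compute_alt (gold_triples_list : List (List (Int × Int × String))) (pred_triples_list : List (List (Int × Int × String))) (len_set : Option (Int × Int)) (label : Option String) : Int × Int × Int × Int :=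
  (gold_triples_list.zip pred_triples_list).foldl (fun st gp =>
    let gdgu := get_set_dict_4snt gp.1 len_set label
    let pdpu := get_set_dict_4snt gp.2 len_set label
    -- label_span_correct += sum(min(v, pred_dict.get(k, 0)) for k, v in gold_dict.items())
    let lc := st.2.1 + (gdgu.1.items.map (fun kv => min kv.2 (pdpu.1.getD kv.1 0))).sum
    -- if not label: unlabel_span_correct += sum(min(v, unlabel_Pspan_count.get(k, 0)) for …)
    let uc := st.1 + (if pyTruthyLabel label then 0
      else (gdgu.2.items.map (fun kv => min kv.2 (pdpu.2.getD kv.1 0))).sum)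
    (uc, lc, st.2.2.1 + PySem.List.len gp.1, st.2.2.2 + PySem.List.len gp.2))
    (0, 0, 0, 0)

-- ===== PRECONDITION & SPEC =====
def Spec_statistic_compute (gold_triples_list : List (List (Int × Int × String))) (pred_triples_list : List (List (Int × Int × String))) (len_set : Option (Int × Int)) (label : Option String) (out : Int × Int × Int × Int) : Prop := out = statistic_compute_alt gold_triples_list pred_triples_list len_set label
instance (gold_triples_list : List (List (Int × Int × String))) (pred_triples_list : List (List (Int × Int × String))) (len_set : Option (Int × Int)) (label : Option String) (out : Int × Int × Int × Int) : Decidable (Spec_statistic_compute gold_triples_list pred_triples_list len_set label out) := by unfold Spec_statistic_compute; infer_instance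

-- ===== CLAIM (what is proved, stated in full; the proofs are below) =====
def Claim_equal_statistic_compute : Prop := ∀ (gold_triples_list : List (List (Int × Int × String))) (pred_triples_list : List (List (Int × Int × String))) (len_set : Option (Int × Int)) (label : Option String), Dom_statistic_compute gold_triples_list pred_triples_list len_set label → Spec_statistic_compute gold_triples_list pred_triples_list len_set label (statistic_compute gold_triples_list pred_triples_list len_set label)

-- ===== LEMMAS AND PROOFS =====

def pvOcc1 (len_set : Option (Int × Int)) (label : Option String) (t : Int × Int × String) :
    List (Int × Int × String) :=
  (match len_set with
   | some ls => if ls.1 ≤ t.2.1 - t.1 ∧ t.2.1 - t.1 ≤ ls.2 then [t] else []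
   | none => []) ++
  (match label with
   | some lab => if lab ≠ "" ∧ t.2.2 == lab then [t] else []
   | none => []) ++
  (if len_set = none ∧ pyTruthyLabel label = false then [t] else [])

def pvOcc2 (len_set : Option (Int × Int)) (label : Option String) (t : Int × Int × String) :
    List (Int × Int) :=
  (match len_set with
   | some ls => if ls.1 ≤ t.2.1 - t.1 ∧ t.2.1 - t.1 ≤ ls.2 then [(t.1, t.2.1)] else []
   | none => []) ++
  (if len_set = none ∧ pyTruthyLabel label = false then [(t.1, t.2.1)] else [])


lemma pvOcc2_eq_map_pref (len_set : Option (Int × Int)) (label : Option String)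
    (hl : pyTruthyLabel label = false) (t : Int × Int × String) :
    pvOcc2 len_set label t = (pvOcc1 len_set label t).map (fun k => (k.1, k.2.1)) := by
  cases label with
  | none => cases len_set <;> simp [pvOcc1, pvOcc2, pyTruthyLabel] <;> split_ifs <;> simp
  | some lab =>
    simp [pyTruthyLabel] at hl
    cases len_set <;> simp [pvOcc1, pvOcc2, pyTruthyLabel, hl] <;> split_ifs <;> simp


lemma gsd_step (len_set : Option (Int × Int)) (label : Option String)
    (t : Int × Int × String) (d1 : PySem.Dict (Int × Int × String) Int)
    (d2 : PySem.Dict (Int × Int) Int) :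
    pvGsdStep len_set label (d1, d2) t =
    ((pvOcc1 len_set label t).foldl (fun d x => d.insert x (d.getD x 0 + 1)) d1,
     (pvOcc2 len_set label t).foldl (fun d x => d.insert x (d.getD x 0 + 1)) d2) := by
  unfold pvGsdStep
  obtain ⟨sv, ev, lv⟩ := t
  cases len_set <;> cases label <;>
    simp only [pvOcc1, pvOcc2, pyTruthyLabel] <;> split_ifs <;>
    simp_all [List.foldl]
lemma gsd_fold (len_set : Option (Int × Int)) (label : Option String)
    (triples : List (Int × Int × String)) :
    ∀ (d1 : PySem.Dict (Int × Int × String) Int) (d2 : PySem.Dict (Int × Int) Int),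
    triples.foldl (pvGsdStep len_set label) (d1, d2) =
    ((triples.flatMap (pvOcc1 len_set label)).foldl (fun d x => d.insert x (d.getD x 0 + 1)) d1,
     (triples.flatMap (pvOcc2 len_set label)).foldl (fun d x => d.insert x (d.getD x 0 + 1)) d2) := by
  induction triples with
  | nil => intro d1 d2; simp
  | cons t ts ih =>
    intro d1 d2
    rw [List.foldl_cons, gsd_step len_set label t d1 d2, ih]
    simp [List.foldl_append]
lemma get_set_dict_eq_counter (span_triples : List (Int × Int × String))
    (len_set : Option (Int × Int)) (label : Option String) :
    get_set_dict_4snt span_triples len_set label =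
      (PySem.Dict.counter (span_triples.flatMap (pvOcc1 len_set label)),
       PySem.Dict.counter (span_triples.flatMap (pvOcc2 len_set label))) := by
  unfold get_set_dict_4snt
  rw [gsd_fold len_set label span_triples PySem.Dict.empty PySem.Dict.empty]
  rw [PySem.Dict.foldl_insert_getD_add_one_eq_counter, PySem.Dict.foldl_insert_getD_add_one_eq_counter]


def pvCap {κ : Type} [BEq κ] (d : PySem.Dict κ Int) (k : κ) : Nat :=
  if d.contains k then (d.getD k 0).toNat else 0


lemma pvCap_insert_dec {κ : Type} [BEq κ] [LawfulBEq κ] [DecidableEq κ]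
    (d : PySem.Dict κ Int) (k x : κ) (h : d.contains k = true) :
    pvCap (d.insert k (d.getD k 0 - 1)) x = pvCap d x - (if x = k then 1 else 0) := by
  unfold pvCap
  rw [PySem.Dict.getD_insert, PySem.Dict.contains_insert]
  by_cases hx : x = k
  · subst hx; simp [h]
  · simp [hx]

lemma pvCap_zero_of_guard_false {κ : Type} [BEq κ] (d : PySem.Dict κ Int) (k : κ)
    (h : ¬ (d.contains k = true ∧ d.getD k 0 > 0)) : pvCap d k = 0 := by
  unfold pvCap
  by_cases hc : d.contains k = true
  · simp [hc] at h ⊢; omega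
  · simp [hc]

lemma pvCap_pos_of_guard {κ : Type} [BEq κ] (d : PySem.Dict κ Int) (k : κ)
    (h : d.contains k = true ∧ d.getD k 0 > 0) : 0 < pvCap d k := by
  unfold pvCap; simp [h.1]; omega

lemma pvInnerStep_iterate (label : Option String) (k : Int × Int × String) (n : Nat) :
    ∀ (pd : PySem.Dict (Int × Int × String) Int) (pu : PySem.Dict (Int × Int) Int) (lc uc : Int),
      ((pvInnerStep label k)^[n] (pd, pu, lc, uc)).2.2.1 = lc + (min n (pvCap pd k) : Nat) ∧
      ((pvInnerStep label k)^[n] (pd, pu, lc, uc)).2.2.2 =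
        uc + (if pyTruthyLabel label = true then 0 else (min n (pvCap pu (k.1, k.2.1)) : Nat) : Int) ∧
      (∀ x, pvCap ((pvInnerStep label k)^[n] (pd, pu, lc, uc)).1 x =
        pvCap pd x - (if x = k then min n (pvCap pd k) else 0)) ∧
      (∀ x, pvCap ((pvInnerStep label k)^[n] (pd, pu, lc, uc)).2.1 x =
        pvCap pu x - (if pyTruthyLabel label = false ∧ x = (k.1, k.2.1)
                      then min n (pvCap pu (k.1, k.2.1)) else 0)) := by
  induction n with
  | zero => intro pd pu lc uc; simp
  | succ n ih =>
    intro pd pu lc uc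
    rw [Function.iterate_succ_apply]
    by_cases h2 : pyTruthyLabel label = true
    · -- label truthy: pu component is never touched
      by_cases h1 : pd.contains k = true ∧ pd.getD k 0 > 0
      · have hstep : pvInnerStep label k (pd, pu, lc, uc)
            = (pd.insert k (pd.getD k 0 - 1), pu, lc + 1, uc) := by
          simp [pvInnerStep, h1, h2]
        rw [hstep]
        obtain ⟨e1, e2, e3, e4⟩ := ih (pd.insert k (pd.getD k 0 - 1)) pu (lc + 1) uc
        have hck : 0 < pvCap pd k := pvCap_pos_of_guard pd k h1
        refine ⟨?_, ?_, ?_, ?_⟩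
        · rw [e1, pvCap_insert_dec pd k k h1.1, if_pos rfl]
          push_cast; omega
        · rw [e2, if_pos h2, if_pos h2]
        · intro x
          rw [e3 x, pvCap_insert_dec pd k x h1.1, pvCap_insert_dec pd k k h1.1, if_pos rfl]
          by_cases hx : x = k <;> simp [hx] <;> omega
        · intro x
          rw [e4 x]
          simp [h2]
      · have hstep : pvInnerStep label k (pd, pu, lc, uc) = (pd, pu, lc, uc) := by
          simp [pvInnerStep, h1, h2]
        rw [hstep]
        obtain ⟨e1, e2, e3, e4⟩ := ih pd pu lc uc
        have hck : pvCap pd k = 0 := pvCap_zero_of_guard_false pd k h1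
        refine ⟨by rw [e1, hck]; simp, by rw [e2, if_pos h2, if_pos h2], ?_, ?_⟩
        · intro x; rw [e3 x, hck]; simp
        · intro x; rw [e4 x]; simp [h2]
    · -- label falsy
      have h2f : pyTruthyLabel label = false := by simpa using h2
      by_cases h1 : pd.contains k = true ∧ pd.getD k 0 > 0 <;>
        by_cases g2 : pu.contains (k.1, k.2.1) = true ∧ pu.getD (k.1, k.2.1) 0 > 0
      · have hstep : pvInnerStep label k (pd, pu, lc, uc)
            = (pd.insert k (pd.getD k 0 - 1),
               pu.insert (k.1, k.2.1) (pu.getD (k.1, k.2.1) 0 - 1), lc + 1, uc + 1) := by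
          simp [pvInnerStep, h1, h2f, g2]
        rw [hstep]
        obtain ⟨e1, e2, e3, e4⟩ := ih (pd.insert k (pd.getD k 0 - 1))
          (pu.insert (k.1, k.2.1) (pu.getD (k.1, k.2.1) 0 - 1)) (lc + 1) (uc + 1)
        have hck : 0 < pvCap pd k := pvCap_pos_of_guard pd k h1
        have hcu : 0 < pvCap pu (k.1, k.2.1) := pvCap_pos_of_guard pu _ g2
        refine ⟨?_, ?_, ?_, ?_⟩
        · rw [e1, pvCap_insert_dec pd k k h1.1, if_pos rfl]
          push_cast; omega
        · rw [e2, if_neg h2, if_neg h2,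
            pvCap_insert_dec pu (k.1, k.2.1) (k.1, k.2.1) g2.1, if_pos rfl]
          push_cast; omega
        · intro x
          rw [e3 x, pvCap_insert_dec pd k x h1.1, pvCap_insert_dec pd k k h1.1, if_pos rfl]
          by_cases hx : x = k <;> simp [hx] <;> omega
        · intro x
          rw [e4 x, pvCap_insert_dec pu (k.1, k.2.1) x g2.1,
            pvCap_insert_dec pu (k.1, k.2.1) (k.1, k.2.1) g2.1, if_pos rfl]
          by_cases hx : x = (k.1, k.2.1) <;> simp [hx, h2f] <;> omega
      · have hstep : pvInnerStep label k (pd, pu, lc, uc)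
            = (pd.insert k (pd.getD k 0 - 1), pu, lc + 1, uc) := by
          simp [pvInnerStep, h1, h2f, g2]
        rw [hstep]
        obtain ⟨e1, e2, e3, e4⟩ := ih (pd.insert k (pd.getD k 0 - 1)) pu (lc + 1) uc
        have hck : 0 < pvCap pd k := pvCap_pos_of_guard pd k h1
        have hcu : pvCap pu (k.1, k.2.1) = 0 := pvCap_zero_of_guard_false pu _ g2
        refine ⟨?_, ?_, ?_, ?_⟩
        · rw [e1, pvCap_insert_dec pd k k h1.1, if_pos rfl]
          push_cast; omega
        · rw [e2, if_neg h2, if_neg h2, hcu]; simp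
        · intro x
          rw [e3 x, pvCap_insert_dec pd k x h1.1, pvCap_insert_dec pd k k h1.1, if_pos rfl]
          by_cases hx : x = k <;> simp [hx] <;> omega
        · intro x
          rw [e4 x, hcu]
          simp
      · have hstep : pvInnerStep label k (pd, pu, lc, uc)
            = (pd, pu.insert (k.1, k.2.1) (pu.getD (k.1, k.2.1) 0 - 1), lc, uc + 1) := by
          simp [pvInnerStep, h1, h2f, g2]
        rw [hstep]
        obtain ⟨e1, e2, e3, e4⟩ := ih pd
          (pu.insert (k.1, k.2.1) (pu.getD (k.1, k.2.1) 0 - 1)) lc (uc + 1)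
        have hck : pvCap pd k = 0 := pvCap_zero_of_guard_false pd k h1
        have hcu : 0 < pvCap pu (k.1, k.2.1) := pvCap_pos_of_guard pu _ g2
        refine ⟨by rw [e1, hck]; simp, ?_, ?_, ?_⟩
        · rw [e2, if_neg h2, if_neg h2,
            pvCap_insert_dec pu (k.1, k.2.1) (k.1, k.2.1) g2.1, if_pos rfl]
          push_cast; omega
        · intro x; rw [e3 x, hck]; simp
        · intro x
          rw [e4 x, pvCap_insert_dec pu (k.1, k.2.1) x g2.1,
            pvCap_insert_dec pu (k.1, k.2.1) (k.1, k.2.1) g2.1, if_pos rfl]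
          by_cases hx : x = (k.1, k.2.1) <;> simp [hx, h2f] <;> omega
      · have hstep : pvInnerStep label k (pd, pu, lc, uc) = (pd, pu, lc, uc) := by
          simp [pvInnerStep, h1, h2f, g2]
        rw [hstep]
        obtain ⟨e1, e2, e3, e4⟩ := ih pd pu lc uc
        have hck : pvCap pd k = 0 := pvCap_zero_of_guard_false pd k h1
        have hcu : pvCap pu (k.1, k.2.1) = 0 := pvCap_zero_of_guard_false pu _ g2
        refine ⟨by rw [e1, hck]; simp, by rw [e2, if_neg h2, if_neg h2, hcu]; simp, ?_, ?_⟩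
        · intro x; rw [e3 x, hck]; simp
        · intro x; rw [e4 x, hcu]; simp


def pvSatT {κ : Type} [DecidableEq κ] : List (κ × Nat) → (κ → Nat) → Nat
  | [], _ => 0
  | (q, m) :: rest, c =>
      min m (c q) + pvSatT rest (fun x => if x = q then c q - min m (c q) else c x)
lemma foldl_ignore {α β : Type} (f : α → α) (l : List β) (s : α) :
    l.foldl (fun a _ => f a) s = f^[l.length] s := by
  induction l generalizing s with
  | nil => simp
  | cons x t ih => simp [List.foldl_cons, ih, Function.iterate_succ_apply]
lemma length_pyRange_one (v : Int) : (PySem.List.pyRange 0 v 1).length = v.toNat := by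
  by_cases h : 0 ≤ v
  · obtain ⟨n, rfl⟩ := Int.eq_ofNat_of_zero_le h
    rw [PySem.List.pyRange_zero_natCast]
    simp
  · have hv : v < 0 := by omega
    have : PySem.List.pyRange 0 v 1 = [] := by
      simp [PySem.List.pyRange]
      omega
    rw [this]
    simp
    omega
lemma pvSntLoop_spec (label : Option String) (ps : List ((Int × Int × String) × Int)) :
    ∀ (pd : PySem.Dict (Int × Int × String) Int) (pu : PySem.Dict (Int × Int) Int) (lc uc : Int),
      (pvSntLoop label ps (pd, pu, lc, uc)).2.2.1 =
        lc + (pvSatT (ps.map (fun p => (p.1, p.2.toNat))) (pvCap pd) : Nat) ∧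
      (pvSntLoop label ps (pd, pu, lc, uc)).2.2.2 =
        uc + (if pyTruthyLabel label = true then 0
          else (pvSatT (ps.map (fun p => ((p.1.1, p.1.2.1), p.2.toNat))) (pvCap pu) : Nat) : Int) := by
  induction ps with
  | nil =>
    intro pd pu lc uc
    constructor <;> simp [pvSntLoop, pvSatT]
  | cons kv rest ih =>
    intro pd pu lc uc
    have hone : pvSntLoop label (kv :: rest) (pd, pu, lc, uc)
        = pvSntLoop label rest ((pvInnerStep label kv.1)^[kv.2.toNat] (pd, pu, lc, uc)) := by
      rw [pvSntLoop, List.foldl_cons, foldl_ignore, length_pyRange_one]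
      rfl
    obtain ⟨e1, e2, e3, e4⟩ := pvInnerStep_iterate label kv.1 kv.2.toNat pd pu lc uc
    set st' := (pvInnerStep label kv.1)^[kv.2.toNat] (pd, pu, lc, uc) with hst
    have hrepr : st' = (st'.1, st'.2.1, st'.2.2.1, st'.2.2.2) := rfl
    obtain ⟨ih1, ih2⟩ := ih st'.1 st'.2.1 st'.2.2.1 st'.2.2.2
    rw [hone, hrepr]
    constructor
    · rw [ih1, e1]
      have hcapf : pvCap st'.1 = (fun x =>
          if x = kv.1 then pvCap pd kv.1 - min kv.2.toNat (pvCap pd kv.1) else pvCap pd x) := by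
        funext x
        rw [e3 x]
        by_cases hx : x = kv.1 <;> simp [hx]
      rw [hcapf]
      rw [show (kv :: rest).map (fun p => (p.1, p.2.toNat))
          = (kv.1, kv.2.toNat) :: rest.map (fun p => (p.1, p.2.toNat)) from rfl]
      rw [show pvSatT ((kv.1, kv.2.toNat) :: rest.map (fun p => (p.1, p.2.toNat))) (pvCap pd)
          = min kv.2.toNat (pvCap pd kv.1) + pvSatT (rest.map (fun p => (p.1, p.2.toNat)))
              (fun x => if x = kv.1 then pvCap pd kv.1 - min kv.2.toNat (pvCap pd kv.1)
                        else pvCap pd x) from rfl]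
      push_cast
      ring
    · rw [ih2, e2]
      by_cases h2 : pyTruthyLabel label = true
      · simp [h2]
      · have h2f : pyTruthyLabel label = false := by simpa using h2
        rw [if_neg h2, if_neg h2, if_neg h2]
        have hcapf : pvCap st'.2.1 = (fun x =>
            if x = (kv.1.1, kv.1.2.1)
            then pvCap pu (kv.1.1, kv.1.2.1) - min kv.2.toNat (pvCap pu (kv.1.1, kv.1.2.1))
            else pvCap pu x) := by
          funext x
          rw [e4 x]
          by_cases hx : x = (kv.1.1, kv.1.2.1) <;> simp [hx, h2f]
        rw [hcapf]
        rw [show (kv :: rest).map (fun p => ((p.1.1, p.1.2.1), p.2.toNat))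
            = ((kv.1.1, kv.1.2.1), kv.2.toNat) :: rest.map (fun p => ((p.1.1, p.1.2.1), p.2.toNat)) from rfl]
        rw [show pvSatT (((kv.1.1, kv.1.2.1), kv.2.toNat) :: rest.map (fun p => ((p.1.1, p.1.2.1), p.2.toNat))) (pvCap pu)
            = min kv.2.toNat (pvCap pu (kv.1.1, kv.1.2.1)) + pvSatT (rest.map (fun p => ((p.1.1, p.1.2.1), p.2.toNat)))
                (fun x => if x = (kv.1.1, kv.1.2.1)
                          then pvCap pu (kv.1.1, kv.1.2.1) - min kv.2.toNat (pvCap pu (kv.1.1, kv.1.2.1))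
                          else pvCap pu x) from rfl]
        push_cast
        ring
def pvAmt {κ : Type} [DecidableEq κ] (ps : List (κ × Nat)) (q : κ) : Nat :=
  (ps.map (fun p => if p.1 = q then p.2 else 0)).sum
lemma pvAmt_eq_zero {κ : Type} [DecidableEq κ] (ps : List (κ × Nat)) (q : κ)
    (h : q ∉ ps.map Prod.fst) : pvAmt ps q = 0 := by
  unfold pvAmt
  apply List.sum_eq_zero
  intro x hx
  simp only [List.mem_map] at hx
  obtain ⟨p, hp, rfl⟩ := hx
  have : p.1 ≠ q := fun he => h (List.mem_map.mpr ⟨p, hp, he⟩)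
  simp [this]
lemma pvSatT_eq_sum {κ : Type} [DecidableEq κ] (ps : List (κ × Nat)) (c : κ → Nat) :
    pvSatT ps c = ∑ q ∈ (ps.map Prod.fst).toFinset, min (pvAmt ps q) (c q) := by
  induction ps generalizing c with
  | nil => simp [pvSatT]
  | cons p rest ih =>
    obtain ⟨q, m⟩ := p
    rw [show pvSatT ((q, m) :: rest) c
        = min m (c q) + pvSatT rest (fun x => if x = q then c q - min m (c q) else c x) from rfl]
    rw [ih]
    have hamt : ∀ x, pvAmt ((q, m) :: rest) x = (if q = x then m else 0) + pvAmt rest x := by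
      intro x; simp [pvAmt]
    have hamtq : pvAmt ((q, m) :: rest) q = m + pvAmt rest q := by simp [pvAmt]
    by_cases hq : q ∈ (rest.map Prod.fst).toFinset
    · have hset : ((( q, m) :: rest).map Prod.fst).toFinset = (rest.map Prod.fst).toFinset := by
        simp [Finset.insert_eq_self.mpr hq]
      rw [hset]
      rw [← Finset.add_sum_erase _ _ hq, ← Finset.add_sum_erase _ _ hq]
      have hrest : ∀ x ∈ (rest.map Prod.fst).toFinset.erase q,
          min (pvAmt rest x) (if x = q then c q - min m (c q) else c x)
          = min (pvAmt ((q, m) :: rest) x) (c x) := by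
        intro x hx
        have hne : x ≠ q := (Finset.mem_erase.mp hx).1
        rw [hamt x, if_neg hne, if_neg (fun h => hne h.symm)]
        simp
      rw [Finset.sum_congr rfl hrest]
      have hqq : (if q = q then c q - min m (c q) else c q) = c q - min m (c q) := if_pos rfl
      rw [hamtq, hqq]
      omega
    · have hset : (((q, m) :: rest).map Prod.fst).toFinset
          = insert q (rest.map Prod.fst).toFinset := by simp
      rw [hset, Finset.sum_insert hq]
      have hz : pvAmt rest q = 0 := pvAmt_eq_zero _ _ (by simpa using hq)
      have hrest : ∀ x ∈ (rest.map Prod.fst).toFinset,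
          min (pvAmt rest x) (if x = q then c q - min m (c q) else c x)
          = min (pvAmt ((q, m) :: rest) x) (c x) := by
        intro x hx
        have hne : x ≠ q := fun h => hq (h ▸ hx)
        rw [hamt x, if_neg hne, if_neg (fun h => hne h.symm)]
        simp
      rw [Finset.sum_congr rfl hrest]
      rw [hamtq]
      omega
lemma sum_ite_count {α κ : Type} [BEq κ] [LawfulBEq κ] [DecidableEq κ] [BEq α] [LawfulBEq α] [DecidableEq α]
    (l : List α) (g : α → κ) (x : κ) :
    (∑ k ∈ l.toFinset, if g k = x then l.count k else 0) = (l.map g).count x := by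
  induction l with
  | nil => simp
  | cons a t ih =>
    have hF : ∀ k, (if g k = x then (a :: t).count k else 0) =
        (if g k = x then t.count k else 0) + (if k = a then (if g a = x then 1 else 0) else 0) := by
      intro k
      by_cases hk : k = a
      · subst hk; simp; split_ifs <;> omega
      · rw [List.count_cons]
        split_ifs <;> simp_all
    simp only [hF, Finset.sum_add_distrib]
    rw [Finset.sum_ite_eq' ((a :: t).toFinset) a (fun _ => if g a = x then 1 else 0)]
    have h1 : (∑ k ∈ (a :: t).toFinset, if g k = x then t.count k else 0)
        = ∑ k ∈ t.toFinset, if g k = x then t.count k else 0 := by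
      rw [List.toFinset_cons]
      by_cases ha : a ∈ t.toFinset
      · rw [Finset.insert_eq_self.mpr ha]
      · rw [Finset.sum_insert ha]
        have : t.count a = 0 := List.count_eq_zero.mpr (by simpa using ha)
        simp [this]
    rw [h1, ih]
    simp [List.count_cons]
lemma pvSet_toFinset {α : Type} [BEq α] [LawfulBEq α] [DecidableEq α] (l : List α) :
    (PySem.Set.ofList l).toFinset = l.toFinset := by
  ext x; simp [PySem.Set.mem_ofList]
lemma pvCap_counter {κ : Type} [BEq κ] [LawfulBEq κ] (xs : List κ) (q : κ) :
    pvCap (PySem.Dict.counter xs) q = xs.count q := by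
  unfold pvCap
  rw [PySem.Dict.contains_counter, PySem.Dict.getD_counter]
  by_cases h : q ∈ xs
  · simp [h]
  · simp [h, List.count_eq_zero.mpr h]
lemma satT_counter {α κ : Type} [BEq α] [LawfulBEq α] [DecidableEq α]
    [BEq κ] [LawfulBEq κ] [DecidableEq κ] (L : List α) (Q : List κ) (g : α → κ) :
    pvSatT ((PySem.Dict.counter L).items.map (fun p => (g p.1, p.2.toNat)))
        (pvCap (PySem.Dict.counter Q))
      = ∑ q ∈ (L.map g).toFinset, min ((L.map g).count q) (Q.count q) := by
  rw [PySem.Dict.items_counter, List.map_map]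
  have hcomp : ((fun p : α × Int => (g p.1, p.2.toNat)) ∘ fun k => (k, (L.count k : Int)))
      = fun k => (g k, L.count k) := by
    funext k; simp
  rw [hcomp, pvSatT_eq_sum, List.map_map]
  have hfst : (Prod.fst ∘ fun k => (g k, L.count k)) = g := by funext k; simp
  rw [hfst]
  have hset : ((PySem.Set.ofList L).map g).toFinset = (L.map g).toFinset := by
    ext q; simp [PySem.Set.mem_ofList]
  rw [hset]
  apply Finset.sum_congr rfl
  intro q hq
  have hamt : pvAmt ((PySem.Set.ofList L).map (fun k => (g k, L.count k))) q
      = (L.map g).count q := by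
    unfold pvAmt
    rw [List.map_map]
    have : ((fun p : κ × Nat => if p.1 = q then p.2 else 0) ∘ fun k => (g k, L.count k))
        = fun k => if g k = q then L.count k else 0 := by funext k; simp
    rw [this, ← List.sum_toFinset _ (PySem.Set.nodup_ofList L), pvSet_toFinset,
      sum_ite_count L g q]

  rw [hamt, pvCap_counter]

lemma items_min_sum {α : Type} [BEq α] [LawfulBEq α] [DecidableEq α] (L Q : List α) :
    ((PySem.Dict.counter L).items.map
        (fun kv => min kv.2 ((PySem.Dict.counter Q).getD kv.1 0))).sum
      = ((∑ q ∈ L.toFinset, min (L.count q) (Q.count q) : Nat) : Int) := by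
  rw [PySem.Dict.items_counter, List.map_map]
  have hcomp : ((fun kv : α × Int => min kv.2 ((PySem.Dict.counter Q).getD kv.1 0))
      ∘ fun k => (k, (L.count k : Int)))
      = fun k => ((min (L.count k) (Q.count k) : Nat) : Int) := by
    funext k
    simp [PySem.Dict.getD_counter, Nat.cast_min]
  rw [hcomp]
  rw [← List.sum_toFinset _ (PySem.Set.nodup_ofList L), pvSet_toFinset]
  push_cast
  rfl

lemma satT_counter_id (L Q : List (Int × Int × String)) :
    pvSatT ((PySem.Dict.counter L).items.map (fun p => (p.1, p.2.toNat)))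
        (pvCap (PySem.Dict.counter Q))
      = ∑ q ∈ L.toFinset, min (L.count q) (Q.count q) := by
  have h := satT_counter L Q (fun k => k)
  simpa using h

lemma satT_counter_pref (L : List (Int × Int × String)) (Q : List (Int × Int)) :
    pvSatT ((PySem.Dict.counter L).items.map (fun p => ((p.1.1, p.1.2.1), p.2.toNat)))
        (pvCap (PySem.Dict.counter Q))
      = ∑ q ∈ (L.map (fun k => (k.1, k.2.1))).toFinset,
          min ((L.map (fun k => (k.1, k.2.1))).count q) (Q.count q) := by
  have h := satT_counter L Q (fun k => (k.1, k.2.1))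
  simpa using h

lemma flatMap_occ2_eq (len_set : Option (Int × Int)) (label : Option String)
    (hl : pyTruthyLabel label = false) (ts : List (Int × Int × String)) :
    ts.flatMap (pvOcc2 len_set label)
      = (ts.flatMap (pvOcc1 len_set label)).map (fun k => (k.1, k.2.1)) := by
  have hf : pvOcc2 len_set label
      = fun t => (pvOcc1 len_set label t).map (fun k => (k.1, k.2.1)) :=
    funext (pvOcc2_eq_map_pref len_set label hl)
  rw [hf, ← List.map_flatMap]

-- per sentence, A's consuming double loop adds exactly B's min-sums
lemma pvStep_eq (len_set : Option (Int × Int)) (label : Option String)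
    (gt pt : List (Int × Int × String)) (lc u : Int) :
    ((pvSntLoop label (get_set_dict_4snt gt len_set label).1.items
        ((get_set_dict_4snt pt len_set label).1, (get_set_dict_4snt pt len_set label).2, lc, u)).2.2.1,
     (pvSntLoop label (get_set_dict_4snt gt len_set label).1.items
        ((get_set_dict_4snt pt len_set label).1, (get_set_dict_4snt pt len_set label).2, lc, u)).2.2.2) =
    (lc + ((get_set_dict_4snt gt len_set label).1.items.map
        (fun kv => min kv.2 ((get_set_dict_4snt pt len_set label).1.getD kv.1 0))).sum,
     u + (if pyTruthyLabel label = true then 0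
       else ((get_set_dict_4snt gt len_set label).2.items.map
        (fun kv => min kv.2 ((get_set_dict_4snt pt len_set label).2.getD kv.1 0))).sum)) := by
  rw [get_set_dict_eq_counter gt, get_set_dict_eq_counter pt]
  obtain ⟨hA1, hA2⟩ := pvSntLoop_spec label
    ((PySem.Dict.counter (gt.flatMap (pvOcc1 len_set label))).items)
    (PySem.Dict.counter (pt.flatMap (pvOcc1 len_set label)))
    (PySem.Dict.counter (pt.flatMap (pvOcc2 len_set label))) lc u
  rw [Prod.mk.injEq]
  constructor
  · rw [hA1, satT_counter_id, items_min_sum]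
  · rw [hA2]
    by_cases h2 : pyTruthyLabel label = true
    · rw [if_pos h2, if_pos h2]
    · have h2f : pyTruthyLabel label = false := by simpa using h2
      rw [if_neg h2, if_neg h2, satT_counter_pref, items_min_sum,
        ← flatMap_occ2_eq len_set label h2f gt]

-- the zipped outer loops of the two ports agree step by step
lemma pvFold_eq (len_set : Option (Int × Int)) (label : Option String)
    (l : List (List (Int × Int × String) × List (Int × Int × String))) :
    ∀ st : Int × Int × Int × Int,
    l.foldl (fun st gp =>
      let gdgu := get_set_dict_4snt gp.1 len_set label
      let pdpu := get_set_dict_4snt gp.2 len_set label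
      let g := st.2.2.1 + PySem.List.len gp.1
      let p := st.2.2.2 + PySem.List.len gp.2
      let r := pvSntLoop label gdgu.1.items (pdpu.1, pdpu.2, st.2.1, st.1)
      (r.2.2.2, r.2.2.1, g, p)) st =
    l.foldl (fun st gp =>
      let gdgu := get_set_dict_4snt gp.1 len_set label
      let pdpu := get_set_dict_4snt gp.2 len_set label
      let lc := st.2.1 + (gdgu.1.items.map (fun kv => min kv.2 (pdpu.1.getD kv.1 0))).sum
      let uc := st.1 + (if pyTruthyLabel label then 0
        else (gdgu.2.items.map (fun kv => min kv.2 (pdpu.2.getD kv.1 0))).sum)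
      (uc, lc, st.2.2.1 + PySem.List.len gp.1, st.2.2.2 + PySem.List.len gp.2)) st := by
  induction l with
  | nil => intro st; rfl
  | cons gp rest ih =>
    intro st
    rw [List.foldl_cons, List.foldl_cons, ih]
    have h := pvStep_eq len_set label gp.1 gp.2 st.2.1 st.1
    rw [Prod.mk.injEq] at h
    obtain ⟨h1, h2⟩ := h
    simp only [h1, h2]

-- ===== VERDICT (by name: the statement is the Claim_ definition above) =====
theorem statistic_compute_spec : Claim_equal_statistic_compute := by
  intro gold_triples_list pred_triples_list len_set label _
  unfold Spec_statistic_compute statistic_compute statistic_compute_alt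
  exact pvFold_eq len_set label (gold_triples_list.zip pred_triples_list) (0, 0, 0, 0)
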